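-- pv_equiv track=rewrite | github.com/leejohy-0223/python-solve | python/algorithm_study/pro42895.py | solution
-- ===== SOURCE A (Python) =====
-- def solution(N, number):
--     sum_set = [set() for _ in range(9)]  # set 8개 만들기(1 ~ 8 사용)
--
--     for i in range(1, 9):
--         n_set = {int(str(N) * i)}
--
--         for j in range(1, i // 2 + 1):
--             for op1 in sum_set[j]:
--                 for op2 in sum_set[i - j]:
--                     n_set.add(op1 + op2)
--                     n_set.add(op1 - op2)
--                     n_set.add(op2 - op1)
--                     n_set.add(op1 * op2)
--                     if op1 != 0:
--                         n_set.add(op2 // op1)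
--                     if op2 != 0:
--                         n_set.add(op1 // op2)
--
--         sum_set[i] = n_set
--         if number in sum_set[i]:
--             return i
--
--     return -1
-- ===== SOURCE B (Python) =====
-- def solution(N, number):
--     # Memoized recursion: reachable(i) = all values expressible with exactly i copies of N.
--     # Sweeps the FULL split range 1..i-1 and uses only one direction of - and //;
--     # symmetry of the split (j vs i-j) supplies the other direction.
--     memo = {}
--
--     def reachable(i):
--         if i not in memo:
--             s = {int(str(N) * i)}
--             for j in range(1, i):
--                 for a in reachable(j):
--                     for b in reachable(i - j):
--                         s.add(a + b)
--                         s.add(a - b)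
--                         s.add(a * b)
--                         if b != 0:
--                             s.add(a // b)
--             memo[i] = s
--         return memo[i]
--
--     for i in range(1, 9):
--         if number in reachable(i):
--             return i
--     return -1
-- ===== Notes on version B (the rewrite author's own statement) =====
-- stated objective: alternative
-- what changed: Replaces the bottom-up table of sets with a top-down memoized recursion reachable(i), which sweeps the full split range 1..i-1 with only one subtraction and one division direction per pair (the symmetry j vs i-j supplies the other direction), instead of A's half range 1..i//2 with all six operation variants.
import Mathlib
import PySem

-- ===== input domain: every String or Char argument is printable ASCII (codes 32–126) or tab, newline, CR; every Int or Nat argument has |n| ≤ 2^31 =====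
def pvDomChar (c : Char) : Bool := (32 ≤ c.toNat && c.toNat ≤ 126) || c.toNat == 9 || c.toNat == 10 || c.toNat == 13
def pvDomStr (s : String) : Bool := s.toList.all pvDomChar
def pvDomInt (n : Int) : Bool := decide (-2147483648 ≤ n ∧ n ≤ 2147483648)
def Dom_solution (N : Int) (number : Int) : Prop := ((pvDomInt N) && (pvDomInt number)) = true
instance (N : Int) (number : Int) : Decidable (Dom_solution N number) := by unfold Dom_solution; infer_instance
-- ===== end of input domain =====

-- B changes the decomposition: memoized top-down recursion over the split size, full split
-- range with one subtraction/division direction instead of A's half range with both; same cost.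
-- (Both programs raise ValueError for negative N unless number == N; Pre_ excludes that.)

-- ===== PORT A =====

-- int(str(N) * i): i concatenated copies of str(N), parsed back; exact via PySem.Int.ofChars?.
-- For N < 0 and i ≥ 2 Python raises ValueError (ofChars? = none); that is outside Pre_,
-- the port returns 0 there.  (Shared by both ports: both Pythons contain this expression.)
def pvLit (N : Int) (i : Nat) : Int :=
  (PySem.Int.ofChars? (List.replicate i (PySem.Int.toChars N)).flatten).getD 0

-- the six n_set.add calls of A's innermost body, op1 = a, op2 = b, in Python's order
def opsAddA (s : PySem.Set Int) (a b : Int) : PySem.Set Int :=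
  let s := s.add (a + b)
  let s := s.add (a - b)
  let s := s.add (b - a)
  let s := s.add (a * b)
  let s := if a ≠ 0 then s.add (PySem.Int.floordiv b a) else s
  if b ≠ 0 then s.add (PySem.Int.floordiv a b) else s

-- one iteration of A's outer loop: n_set = {int(str(N)*i)}; for j in range(1, i//2+1): …
-- range(1, i//2+1) = [1, …, i//2] = List.range' 1 (i/2) (loop variables kept as Nat; exact).
-- Set iteration order is not modelled; the built value is a Set only queried for membership.
def stepA (N : Int) (sum_set : List (PySem.Set Int)) (i : Nat) : PySem.Set Int :=
  (List.range' 1 (i / 2)).foldl (fun n_set j =>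
      (sum_set.getD j []).foldl (fun n_set a =>
          (sum_set.getD (i - j) []).foldl (fun n_set b => opsAddA n_set a b) n_set) n_set)
    (PySem.Set.ofList [pvLit N i])

-- for i in range(1, 9): … with the early return; sum_set[i] = n_set is List.set (i < 9 always)
def loopA (N number : Int) (sum_set : List (PySem.Set Int)) (i : Nat) : Int :=
  if i ≤ 8 then
    let n_set := stepA N sum_set i
    if number ∈ n_set then (i : Int)
    else loopA N number (sum_set.set i n_set) (i + 1)
  else -1
termination_by 9 - i

def solution (N : Int) (number : Int) : Int :=
  loopA N number (List.replicate 9 PySem.Set.empty) 1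

-- ===== PORT B =====

-- the four s.add calls of B's innermost body, in Source B's order
def opsAddB (s : PySem.Set Int) (a b : Int) : PySem.Set Int :=
  let s := s.add (a + b)
  let s := s.add (a - b)
  let s := s.add (a * b)
  if b ≠ 0 then s.add (PySem.Int.floordiv a b) else s

-- reachable(i) with dict memo threaded through; combB is the 'for j in range(1, i)' loop
-- (the '1 ≤ j' in the guard only totalizes the recursion: combB is only called with j ≥ 1).
mutual
def reachB (N : Int) (i : Nat) (memo : PySem.Dict Int (PySem.Set Int)) :
    PySem.Dict Int (PySem.Set Int) × PySem.Set Int :=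
  match memo.get? (i : Int) with
  | some s => (memo, s)
  | none =>
      let p := combB N i 1 memo (PySem.Set.ofList [pvLit N i])
      (p.1.insert (i : Int) p.2, p.2)
termination_by (i, i + 1)

def combB (N : Int) (i j : Nat) (memo : PySem.Dict Int (PySem.Set Int)) (s : PySem.Set Int) :
    PySem.Dict Int (PySem.Set Int) × PySem.Set Int :=
  if h : 1 ≤ j ∧ j < i then
    let p1 := reachB N j memo
    let p2 := reachB N (i - j) p1.1
    let s' := p1.2.foldl (fun s a => p2.2.foldl (fun s b => opsAddB s a b) s) s
    combB N i (j + 1) p2.1 s'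
  else (memo, s)
termination_by (i, i - j)
end

-- for i in range(1, 9): if number in reachable(i): return i
def loopB (N number : Int) (memo : PySem.Dict Int (PySem.Set Int)) (i : Nat) : Int :=
  if i ≤ 8 then
    let p := reachB N i memo
    if number ∈ p.2 then (i : Int)
    else loopB N number p.1 (i + 1)
  else -1
termination_by 9 - i

def solution_alt (N : Int) (number : Int) : Int :=
  loopB N number PySem.Dict.empty 1

-- ===== PRECONDITION & SPEC =====
-- Pre_ excludes negative N with number ≠ N: there int(str(N)*i) at i = 2 raises ValueError
-- in both A and B (for number = N both return 1 at i = 1 before reaching i = 2).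
def Pre_solution (N : Int) (number : Int) : Prop := 0 ≤ N ∨ number = N
instance (N : Int) (number : Int) : Decidable (Pre_solution N number) := by
  unfold Pre_solution; infer_instance
def pvWitness_solution : Int × Int := (5, 26)

def Spec_solution (N : Int) (number : Int) (out : Int) : Prop := out = solution_alt N number
instance (N : Int) (number : Int) (out : Int) : Decidable (Spec_solution N number out) := by
  unfold Spec_solution; infer_instance

-- ===== CLAIM (what is proved, stated in full; the proofs are below) =====
def Claim_equal_solution : Prop := ∀ (N : Int) (number : Int), Dom_solution N number →
  Pre_solution N number → Spec_solution N number (solution N number)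

-- ===== LEMMAS AND PROOFS =====

-- reference predicate: Rch N i x ↔ x is expressible from exactly i copies of N with B's ops
inductive Rch (N : Int) : Nat → Int → Prop where
  | lit (i : Nat) : Rch N i (pvLit N i)
  | add {i j a b : _} (h1 : 1 ≤ j) (h2 : j < i) (ha : Rch N j a) (hb : Rch N (i - j) b) :
      Rch N i (a + b)
  | sub {i j a b : _} (h1 : 1 ≤ j) (h2 : j < i) (ha : Rch N j a) (hb : Rch N (i - j) b) :
      Rch N i (a - b)
  | mul {i j a b : _} (h1 : 1 ≤ j) (h2 : j < i) (ha : Rch N j a) (hb : Rch N (i - j) b) :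
      Rch N i (a * b)
  | div {i j a b : _} (h1 : 1 ≤ j) (h2 : j < i) (ha : Rch N j a) (hb : Rch N (i - j) b)
      (hb0 : b ≠ 0) : Rch N i (PySem.Int.floordiv a b)

def OpB (a b x : Int) : Prop :=
  x = a + b ∨ x = a - b ∨ x = a * b ∨ (b ≠ 0 ∧ x = PySem.Int.floordiv a b)

def OpA (a b x : Int) : Prop :=
  x = a + b ∨ x = a - b ∨ x = b - a ∨ x = a * b ∨
  (a ≠ 0 ∧ x = PySem.Int.floordiv b a) ∨ (b ≠ 0 ∧ x = PySem.Int.floordiv a b)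

theorem Rch_iff (N : Int) (i : Nat) (x : Int) :
    Rch N i x ↔ x = pvLit N i ∨
      ∃ j a b, 1 ≤ j ∧ j < i ∧ Rch N j a ∧ Rch N (i - j) b ∧ OpB a b x := by
  constructor
  · intro h
    cases h with
    | lit => exact Or.inl rfl
    | add h1 h2 ha hb => exact Or.inr ⟨_, _, _, h1, h2, ha, hb, Or.inl rfl⟩
    | sub h1 h2 ha hb => exact Or.inr ⟨_, _, _, h1, h2, ha, hb, Or.inr (Or.inl rfl)⟩
    | mul h1 h2 ha hb => exact Or.inr ⟨_, _, _, h1, h2, ha, hb, Or.inr (Or.inr (Or.inl rfl))⟩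
    | div h1 h2 ha hb hb0 =>
        exact Or.inr ⟨_, _, _, h1, h2, ha, hb, Or.inr (Or.inr (Or.inr ⟨hb0, rfl⟩))⟩
  · rintro (rfl | ⟨j, a, b, h1, h2, ha, hb, (rfl | rfl | rfl | ⟨hb0, rfl⟩)⟩)
    · exact Rch.lit i
    · exact Rch.add h1 h2 ha hb
    · exact Rch.sub h1 h2 ha hb
    · exact Rch.mul h1 h2 ha hb
    · exact Rch.div h1 h2 ha hb hb0

-- membership through a fold that only adds elements
theorem mem_foldl_iff {α : Type} (P : α → Int → Prop) (f : PySem.Set Int → α → PySem.Set Int)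
    (hf : ∀ s e x, x ∈ f s e ↔ x ∈ s ∨ P e x) (l : List α) (s : PySem.Set Int) (x : Int) :
    x ∈ l.foldl f s ↔ x ∈ s ∨ ∃ e ∈ l, P e x := by
  induction l generalizing s with
  | nil => simp
  | cons e l ih => simp [List.foldl, ih, hf]; tauto

theorem mem_opsAddA (s : PySem.Set Int) (a b x : Int) :
    x ∈ opsAddA s a b ↔ x ∈ s ∨ OpA a b x := by
  unfold opsAddA OpA
  split_ifs <;> simp [PySem.Set.mem_add] <;> tauto

theorem mem_opsAddB (s : PySem.Set Int) (a b x : Int) :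
    x ∈ opsAddB s a b ↔ x ∈ s ∨ OpB a b x := by
  unfold opsAddB OpB
  split_ifs <;> simp [PySem.Set.mem_add] <;> tauto

theorem mem_stepA (N : Int) (S : List (PySem.Set Int)) (i : Nat) (x : Int) :
    x ∈ stepA N S i ↔ x = pvLit N i ∨
      ∃ j ∈ List.range' 1 (i / 2), ∃ a ∈ S.getD j [], ∃ b ∈ S.getD (i - j) [], OpA a b x := by
  unfold stepA
  rw [mem_foldl_iff (fun j x => ∃ a ∈ S.getD j [], ∃ b ∈ S.getD (i - j) [], OpA a b x)]
  · simp [PySem.Set.mem_ofList]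
  · intro s j x
    rw [mem_foldl_iff (fun a x => ∃ b ∈ S.getD (i - j) [], OpA a b x)]
    intro s a x
    rw [mem_foldl_iff (fun b x => OpA a b x)]
    intro s b x
    exact mem_opsAddA s a b x

-- symmetric-split argument: A's half range with six ops generates exactly Rch
theorem stepA_correct (N : Int) (S : List (PySem.Set Int)) (i : Nat)
    (hS : ∀ k, 1 ≤ k → k < i → ∀ x, x ∈ S.getD k [] ↔ Rch N k x) (x : Int) :
    x ∈ stepA N S i ↔ Rch N i x := by
  rw [mem_stepA]
  constructor
  · rintro (rfl | ⟨j, hj, a, ha, b, hb, hop⟩)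
    · exact Rch.lit i
    · rw [List.mem_range'_1] at hj
      have h1 : 1 ≤ j := hj.1
      have h2 : j < i := by omega
      have h1' : 1 ≤ i - j := by omega
      have h2' : i - j < i := by omega
      have hra : Rch N j a := (hS j h1 h2 a).mp ha
      have hrb : Rch N (i - j) b := (hS (i - j) h1' h2' b).mp hb
      have hij : i - (i - j) = j := by omega
      have hrb' : Rch N (i - (i - j)) a := by rw [hij]; exact hra
      rcases hop with rfl | rfl | rfl | rfl | ⟨ha0, rfl⟩ | ⟨hb0, rfl⟩
      · exact Rch.add h1 h2 hra hrb
      · exact Rch.sub h1 h2 hra hrb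
      · exact Rch.sub h1' h2' hrb hrb'
      · exact Rch.mul h1 h2 hra hrb
      · exact Rch.div h1' h2' hrb hrb' ha0
      · exact Rch.div h1 h2 hra hrb hb0
  · intro h
    rw [Rch_iff] at h
    rcases h with rfl | ⟨j, a, b, h1, h2, ha, hb, hop⟩
    · exact Or.inl rfl
    · right
      by_cases hjh : j ≤ i / 2
      · refine ⟨j, by rw [List.mem_range'_1]; omega, a, (hS j h1 h2 a).mpr ha,
          b, (hS (i - j) (by omega) (by omega) b).mpr hb, ?_⟩
        rcases hop with rfl | rfl | rfl | ⟨hb0, rfl⟩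
        · exact Or.inl rfl
        · exact Or.inr (Or.inl rfl)
        · exact Or.inr (Or.inr (Or.inr (Or.inl rfl)))
        · exact Or.inr (Or.inr (Or.inr (Or.inr (Or.inr ⟨hb0, rfl⟩))))
      · have hj1 : 1 ≤ i - j := by omega
        have hj2 : i - j ≤ i / 2 := by omega
        have hij : i - (i - j) = j := by omega
        refine ⟨i - j, by rw [List.mem_range'_1]; omega,
          b, (hS (i - j) hj1 (by omega) b).mpr hb,
          a, by rw [hij]; exact (hS j h1 h2 a).mpr ha, ?_⟩
        -- OpA b a x covers B's four ops at the mirrored split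
        rcases hop with rfl | rfl | rfl | ⟨hb0, rfl⟩
        · exact Or.inl (by ring)
        · exact Or.inr (Or.inr (Or.inl rfl))
        · exact Or.inr (Or.inr (Or.inr (Or.inl (by ring))))
        · exact Or.inr (Or.inr (Or.inr (Or.inr (Or.inl ⟨hb0, rfl⟩))))

-- memo invariant: every stored set is exactly Rch at its (Nat) key
def GoodM (N : Int) (m : PySem.Dict Int (PySem.Set Int)) : Prop :=
  ∀ (k : Nat) (s : PySem.Set Int), PySem.Dict.get? m (k : Int) = some s →
    ∀ x, x ∈ s ↔ Rch N k x

mutual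
theorem reachB_correct (N : Int) (i : Nat) (m : PySem.Dict Int (PySem.Set Int))
    (hm : GoodM N m) :
    GoodM N (reachB N i m).1 ∧ ∀ x, x ∈ (reachB N i m).2 ↔ Rch N i x := by
  rw [reachB]
  cases hg : PySem.Dict.get? m (i : Int) with
  | some s => exact ⟨hm, hm i s hg⟩
  | none =>
      have hc := combB_correct N i 1 m (PySem.Set.ofList [pvLit N i]) hm (le_refl 1)
      have hmem : ∀ x, x ∈ (combB N i 1 m (PySem.Set.ofList [pvLit N i])).2 ↔ Rch N i x := by
        intro x
        rw [hc.2 x, Rch_iff]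
        simp [PySem.Set.mem_ofList]
      constructor
      · intro k s hk x
        by_cases hki : (k : Int) = (i : Int)
        · have : k = i := by exact_mod_cast hki
          subst this
          rw [PySem.Dict.get?_insert_self] at hk
          cases hk
          exact hmem x
        · rw [PySem.Dict.get?_insert_of_ne _ _ hki] at hk
          exact hc.1 k s hk x
      · exact hmem
termination_by (i, i + 1)

theorem combB_correct (N : Int) (i j : Nat) (m : PySem.Dict Int (PySem.Set Int))
    (s : PySem.Set Int) (hm : GoodM N m) (hj : 1 ≤ j) :
    GoodM N (combB N i j m s).1 ∧
    ∀ x, x ∈ (combB N i j m s).2 ↔ x ∈ s ∨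
      ∃ j' a b, j ≤ j' ∧ j' < i ∧ Rch N j' a ∧ Rch N (i - j') b ∧ OpB a b x := by
  rw [combB]
  split
  case isTrue h =>
    have h1 := reachB_correct N j m hm
    have h2 := reachB_correct N (i - j) (reachB N j m).1 h1.1
    have hs' : ∀ x, x ∈ (reachB N j m).2.foldl
        (fun s a => (reachB N (i - j) (reachB N j m).1).2.foldl (fun s b => opsAddB s a b) s) s ↔
        x ∈ s ∨ ∃ a b, Rch N j a ∧ Rch N (i - j) b ∧ OpB a b x := by
      intro x
      rw [mem_foldl_iff (fun a x => ∃ b ∈ (reachB N (i - j) (reachB N j m).1).2, OpB a b x)]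
      · constructor
        · rintro (hx | ⟨a, ha, b, hb, hop⟩)
          · exact Or.inl hx
          · exact Or.inr ⟨a, b, (h1.2 a).mp ha, (h2.2 b).mp hb, hop⟩
        · rintro (hx | ⟨a, b, ha, hb, hop⟩)
          · exact Or.inl hx
          · exact Or.inr ⟨a, (h1.2 a).mpr ha, b, (h2.2 b).mpr hb, hop⟩
      · intro s a x
        rw [mem_foldl_iff (fun b x => OpB a b x)]
        intro s b x
        exact mem_opsAddB s a b x
    have hrec := combB_correct N i (j + 1) (reachB N (i - j) (reachB N j m).1).1
      ((reachB N j m).2.foldl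
        (fun s a => (reachB N (i - j) (reachB N j m).1).2.foldl (fun s b => opsAddB s a b) s) s)
      h2.1 (by omega)
    refine ⟨hrec.1, fun x => ?_⟩
    rw [hrec.2 x, hs' x]
    constructor
    · rintro ((hx | ⟨a, b, ha, hb, hop⟩) | ⟨j', a, b, hj1, hj2, ha, hb, hop⟩)
      · exact Or.inl hx
      · exact Or.inr ⟨j, a, b, le_refl j, h.2, ha, hb, hop⟩
      · exact Or.inr ⟨j', a, b, by omega, hj2, ha, hb, hop⟩
    · rintro (hx | ⟨j', a, b, hj1, hj2, ha, hb, hop⟩)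
      · exact Or.inl (Or.inl hx)
      · by_cases hjj : j' = j
        · subst hjj
          exact Or.inl (Or.inr ⟨a, b, ha, hb, hop⟩)
        · exact Or.inr ⟨j', a, b, by omega, hj2, ha, hb, hop⟩
  case isFalse h =>
    refine ⟨hm, fun x => ?_⟩
    simp only []
    constructor
    · exact Or.inl
    · rintro (hx | ⟨j', a, b, hj1, hj2, ha, hb, hop⟩)
      · exact hx
      · omega
termination_by (i, i - j)
end

-- the two loops return the same index
theorem loop_eq (N number : Int) (i : Nat) (S : List (PySem.Set Int))
    (m : PySem.Dict Int (PySem.Set Int)) (hi : 1 ≤ i) (hlen : S.length = 9)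
    (hS : ∀ k, 1 ≤ k → k < i → ∀ x, x ∈ S.getD k [] ↔ Rch N k x) (hm : GoodM N m) :
    loopA N number S i = loopB N number m i := by
  rw [loopA, loopB]
  split
  case isTrue h =>
    have hA := stepA_correct N S i hS
    have hB := reachB_correct N i m hm
    by_cases hc : Rch N i number
    · rw [if_pos ((hA number).mpr hc), if_pos ((hB.2 number).mpr hc)]
    · rw [if_neg (fun hx => hc ((hA number).mp hx)), if_neg (fun hx => hc ((hB.2 number).mp hx))]
      apply loop_eq
      · omega
      · simp [hlen]
      · intro k hk1 hk2 x
        by_cases hki : k = i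
        · subst hki
          have : (S.set k (stepA N S k)).getD k [] = stepA N S k := by
            rw [List.getD_eq_getElem?_getD, List.getElem?_set_self (by omega)]
            rfl
          rw [this]
          exact hA x
        · have : (S.set i (stepA N S i)).getD k [] = S.getD k [] := by
            rw [List.getD_eq_getElem?_getD, List.getElem?_set_ne (by omega),
              ← List.getD_eq_getElem?_getD]
          rw [this]
          exact hS k hk1 (by omega) x
      · exact hB.1
  case isFalse h => rfl
termination_by 9 - i

-- ===== VERDICT (by name: the statement is the Claim_ definition above) =====
theorem solution_spec : Claim_equal_solution := by
  intro N number _hdom _hpre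
  unfold Spec_solution solution solution_alt
  apply loop_eq
  · exact le_refl 1
  · simp
  · intro k hk1 hk2 x
    omega
  · intro k s hk x
    simp [PySem.Dict.get?, PySem.Dict.empty] at hk
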